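-- pv_equiv track=rewrite | github.com/TheBuccaneer/baseball_steal | data/c7b_python debug_milb_api.py | parse_runner_state
-- ===== SOURCE A (Python) =====
-- BASE_MAP = {'first': 1, 'second': 2, 'third': 3, '1B': 1, '2B': 2, '3B': 3}
--
-- def parse_runner_state(runners):
--     """Parse runner state from originBase"""
--     state = ['_', '_', '_']
--
--     if not runners:
--         return '___'
--
--     if isinstance(runners, list):
--         for runner in runners:
--             origin = runner.get('movement', {}).get('originBase', None)
--             if origin in BASE_MAP:
--                 base_idx = BASE_MAP[origin] - 1
--                 state[base_idx] = str(BASE_MAP[origin])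
--
--     return ''.join(state)
-- ===== SOURCE B (Python) =====
-- BASE_MAP = {'first': 1, 'second': 2, 'third': 3, '1B': 1, '2B': 2, '3B': 3}
--
-- def parse_runner_state(runners):
--     """Parse runner state from originBase"""
--     if not runners or not isinstance(runners, list):
--         return '___'
--
--     def occupied(i):
--         # scan the runners for one that originates from base i
--         return any(BASE_MAP.get(r.get('movement', {}).get('originBase', None)) == i
--                    for r in runners)
--
--     return ''.join(str(i) if occupied(i) else '_' for i in (1, 2, 3))
-- ===== Notes on version B (the rewrite author's own statement) =====
-- stated objective: alternative
-- what changed: A makes one pass over the runners, writing str(base) into index base-1 of a pre-filled placeholder list; B inverts the traversal: it builds the string position by position over the fixed bases (1,2,3), each position decided by an existential scan (any) of the runner list, with no mutable state or index arithmetic.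
import Mathlib
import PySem

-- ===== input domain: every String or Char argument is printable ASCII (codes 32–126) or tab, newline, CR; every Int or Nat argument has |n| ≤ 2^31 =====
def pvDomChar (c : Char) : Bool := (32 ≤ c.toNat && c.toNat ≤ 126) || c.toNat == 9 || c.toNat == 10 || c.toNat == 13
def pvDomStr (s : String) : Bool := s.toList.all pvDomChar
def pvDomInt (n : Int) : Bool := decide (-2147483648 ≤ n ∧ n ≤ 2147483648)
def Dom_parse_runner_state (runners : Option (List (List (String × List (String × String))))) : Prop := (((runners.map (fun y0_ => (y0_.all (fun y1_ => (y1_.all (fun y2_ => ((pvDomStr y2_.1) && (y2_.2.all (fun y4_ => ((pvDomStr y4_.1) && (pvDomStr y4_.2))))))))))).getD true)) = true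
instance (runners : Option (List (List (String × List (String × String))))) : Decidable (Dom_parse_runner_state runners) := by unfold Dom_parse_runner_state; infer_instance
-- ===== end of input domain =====

-- B inverts A's traversal: instead of one pass mutating a placeholder list at index base-1,
-- it builds the string over the fixed positions (1,2,3), deciding each by a scan of the runners.

-- module constant BASE_MAP (shared by both Python versions)
def pvBaseMap : PySem.Dict String Int :=
  PySem.Dict.ofList [("first", 1), ("second", 2), ("third", 3), ("1B", 1), ("2B", 2), ("3B", 3)]

-- ===== PORT A =====
def parse_runner_state (runners : Option (List (List (String × List (String × String))))) : String :=
  let state : List String := ["_", "_", "_"]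
  match runners with
  | none => "___"                                  -- 'not runners' (None)
  | some rs =>
    if rs = [] then "___"                          -- 'not runners' (empty list)
    else
      -- isinstance(runners, list) is always true for a list value
      let state := rs.foldl (fun st runner =>
        let movement := (PySem.Dict.mk runner).getD "movement" []
        let origin : Option String := (PySem.Dict.mk movement).get? "originBase"
        match origin with
        | none => st                               -- None not in BASE_MAP
        | some o =>
          match pvBaseMap.get? o with
          | none => st                             -- origin not in BASE_MAP
          | some b => PySem.List.pySetD st (b - 1) (PySem.Int.toStr b)) state
      PySem.Str.join "" state

-- ===== PORT B =====
-- helper 'occupied(i)': any runner originates from base i (Python's any over a generator)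
def pvOccupied (rs : List (List (String × List (String × String)))) (i : Int) : Bool :=
  rs.any (fun r =>
    (match (PySem.Dict.mk ((PySem.Dict.mk r).getD "movement" [])).get? "originBase" with
     | none => (none : Option Int)                 -- BASE_MAP.get(None) is None
     | some o => pvBaseMap.get? o) == some i)

def parse_runner_state_alt (runners : Option (List (List (String × List (String × String))))) : String :=
  match runners with
  | none => "___"                                  -- 'not runners or not isinstance(...)'
  | some rs =>
    if rs = [] then "___"
    else
      PySem.Str.join "" (([1, 2, 3] : List Int).map (fun i =>
        if pvOccupied rs i then PySem.Int.toStr i else "_"))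

-- ===== PRECONDITION & SPEC =====
def Spec_parse_runner_state (runners : Option (List (List (String × List (String × String))))) (out : String) : Prop := out = parse_runner_state_alt runners
instance (runners : Option (List (List (String × List (String × String))))) (out : String) : Decidable (Spec_parse_runner_state runners out) := by unfold Spec_parse_runner_state; infer_instance

-- ===== CLAIM (what is proved, stated in full; the proofs are below) =====
def Claim_equal_parse_runner_state : Prop := ∀ (runners : Option (List (List (String × List (String × String))))), Dom_parse_runner_state runners → Spec_parse_runner_state runners (parse_runner_state runners)

-- ===== LEMMAS AND PROOFS =====

-- the base number a runner contributes (if any)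
def pvBase (runner : List (String × List (String × String))) : Option Int :=
  match (PySem.Dict.mk ((PySem.Dict.mk runner).getD "movement" [])).get? "originBase" with
  | none => none
  | some o => pvBaseMap.get? o

lemma pvBaseMap_get?_cases (o : String) :
    pvBaseMap.get? o = none ∨ pvBaseMap.get? o = some 1 ∨
      pvBaseMap.get? o = some 2 ∨ pvBaseMap.get? o = some 3 := by
  have hmap : pvBaseMap = PySem.Dict.mk
      [("first", 1), ("second", 2), ("third", 3), ("1B", 1), ("2B", 2), ("3B", 3)] := by rfl
  rw [hmap]
  by_cases h1 : "first" = o <;> by_cases h2 : "second" = o <;> by_cases h3 : "third" = o <;>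
    by_cases h4 : "1B" = o <;> by_cases h5 : "2B" = o <;> by_cases h6 : "3B" = o <;>
    simp_all [PySem.Dict.get?_mk_cons] ; exact Or.inl rfl

lemma pvBase_cases (r : List (String × List (String × String))) :
    pvBase r = none ∨ pvBase r = some 1 ∨ pvBase r = some 2 ∨ pvBase r = some 3 := by
  unfold pvBase
  cases (PySem.Dict.mk ((PySem.Dict.mk r).getD "movement" [])).get? "originBase" with
  | none => exact Or.inl rfl
  | some o => exact pvBaseMap_get?_cases o

lemma pvOccupied_eq (rs : List (List (String × List (String × String)))) (i : Int) :
    pvOccupied rs i = rs.any (fun r => pvBase r == some i) := by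
  unfold pvOccupied pvBase
  rfl

lemma foldlA_eq (rs : List (List (String × List (String × String)))) (a b c : String) :
    rs.foldl (fun st runner =>
        let movement := (PySem.Dict.mk runner).getD "movement" []
        let origin : Option String := (PySem.Dict.mk movement).get? "originBase"
        match origin with
        | none => st
        | some o =>
          match pvBaseMap.get? o with
          | none => st
          | some bb => PySem.List.pySetD st (bb - 1) (PySem.Int.toStr bb)) [a, b, c] =
      [if rs.any (fun r => pvBase r == some 1) then "1" else a,
       if rs.any (fun r => pvBase r == some 2) then "2" else b,
       if rs.any (fun r => pvBase r == some 3) then "3" else c] := by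
  induction rs generalizing a b c with
  | nil => simp
  | cons r t ih =>
    have hstep : ∀ st : List String,
        (match (PySem.Dict.mk ((PySem.Dict.mk r).getD "movement" [])).get? "originBase" with
          | none => st
          | some o =>
            match pvBaseMap.get? o with
            | none => st
            | some bb => PySem.List.pySetD st (bb - 1) (PySem.Int.toStr bb)) =
        (match pvBase r with
          | none => st
          | some bb => PySem.List.pySetD st (bb - 1) (PySem.Int.toStr bb)) := by
      intro st
      unfold pvBase
      cases (PySem.Dict.mk ((PySem.Dict.mk r).getD "movement" [])).get? "originBase" <;> rfl
    have s1 : ∀ x y z : String, PySem.List.pySetD [x,y,z] ((1:Int)-1) (PySem.Int.toStr 1) = ["1",y,z] := fun _ _ _ => rfl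
    have s2 : ∀ x y z : String, PySem.List.pySetD [x,y,z] ((2:Int)-1) (PySem.Int.toStr 2) = [x,"2",z] := fun _ _ _ => rfl
    have s3 : ∀ x y z : String, PySem.List.pySetD [x,y,z] ((3:Int)-1) (PySem.Int.toStr 3) = [x,y,"3"] := fun _ _ _ => rfl
    simp only [List.foldl_cons, List.any_cons]
    rw [hstep]
    rcases pvBase_cases r with h | h | h | h <;>
      simp only [h, s1, s2, s3] <;> rw [ih] <;> simp

-- ===== VERDICT (by name: the statement is the Claim_ definition above) =====
theorem parse_runner_state_spec : Claim_equal_parse_runner_state := by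
  intro runners _
  unfold Spec_parse_runner_state parse_runner_state parse_runner_state_alt
  cases runners with
  | none => rfl
  | some rs =>
    by_cases h : rs = []
    · simp [h]
    · simp only [h, if_false]
      rw [foldlA_eq]
      simp only [List.map_cons, List.map_nil, pvOccupied_eq]
      rcases h1 : rs.any (fun r => pvBase r == some 1) <;>
        rcases h2 : rs.any (fun r => pvBase r == some 2) <;>
        rcases h3 : rs.any (fun r => pvBase r == some 3) <;> rfl
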